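-- pv_equiv track=rewrite | github.com/iamolegataeff/ariannamethod | device-1/async_field_forever/field/field_metrics.py | fix_capitalization
-- ===== SOURCE A (Python) =====
-- def fix_capitalization(text: str) -> str:
--     """Исправляет заглавные буквы посреди предложения"""
--     if not text:
--         return text
--
--     # Разбиваем на предложения
--     sentences = []
--     current = ""
--
--     for char in text:
--         current += char
--         if char in '.!?':
--             sentences.append(current.strip())
--             current = ""
--
--     if current.strip():
--         sentences.append(current.strip())
--
--     # Исправляем каждое предложение
--     fixed_sentences = []
--     for sentence in sentences:
--         if sentence:
--             # Первая буква заглавная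
--             fixed = sentence[0].upper() + sentence[1:].lower()
--             # Исправляем "The" посреди предложения
--             fixed = fixed.replace(" The ", " the ")
--             fixed_sentences.append(fixed)
--
--     return " ".join(fixed_sentences)
-- ===== SOURCE B (Python) =====
-- WS = ' \t\n\r\v\f'
-- DELIM = '.!?'
--
-- def fix_capitalization(text: str) -> str:
--     """Single pass: emit each sentence's first letter upper, rest lower, joined by single spaces."""
--     if not text:
--         return text
--     out = []        # emitted pieces
--     ws = ""         # pending whitespace inside the current sentence
--     started = False # current sentence has emitted a character (also: next char is not sentence-initial)
--     for c in text:
--         if c in WS: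
--             if started:
--                 ws += c
--             continue
--         if started:
--             out.append(ws)
--             ws = ""
--             out.append(c.lower())
--         else:
--             if out:
--                 out.append(' ')
--             out.append(c.upper())
--             started = True
--         if c in DELIM:
--             started = False
--             ws = ""
--     return ''.join(out)
-- ===== Notes on version B (the rewrite author's own statement) =====
-- stated objective: alternative
-- what changed: A collects stripped sentence chunks in one loop and then re-capitalizes and joins them in a second loop (with a dead ' The ' replace); B is a single pass over the characters that emits the result directly, tracking only pending whitespace and a sentence-started flag.
import Mathlib
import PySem

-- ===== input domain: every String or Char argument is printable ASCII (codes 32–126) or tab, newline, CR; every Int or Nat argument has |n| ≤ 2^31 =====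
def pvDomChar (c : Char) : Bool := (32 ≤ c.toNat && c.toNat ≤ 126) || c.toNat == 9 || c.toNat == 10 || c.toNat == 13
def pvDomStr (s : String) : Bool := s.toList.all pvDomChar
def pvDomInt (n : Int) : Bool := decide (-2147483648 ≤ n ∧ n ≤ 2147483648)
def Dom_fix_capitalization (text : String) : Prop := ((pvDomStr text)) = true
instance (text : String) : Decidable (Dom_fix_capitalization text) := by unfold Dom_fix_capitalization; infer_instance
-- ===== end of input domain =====

-- B replaces A's two-phase algorithm (collect stripped sentence chunks, then fix each and join)
-- with a single pass that emits the result directly (alternative decomposition, same O(n) cost).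

-- ===== PORT A =====
def pvDelims : List Char := ['.', '!', '?']

-- the first for-loop of A: accumulate `current`, cut at '.', '!' or '?' (chunks appended stripped)
def pvSplitA : List Char → List Char → List (List Char) → List (List Char)
  | [], current, sentences =>
      if PySem.Chars.strip current ≠ [] then sentences ++ [PySem.Chars.strip current] else sentences
  | c :: rest, current, sentences =>
      let current' := current ++ [c]
      if c ∈ pvDelims then pvSplitA rest [] (sentences ++ [PySem.Chars.strip current'])
      else pvSplitA rest current' sentences

-- sentence[0].upper() + sentence[1:].lower(), then .replace(" The ", " the ")
-- (callers guard with `if sentence:`, so the [] case is unreachable)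
def pvFixA : List Char → List Char
  | [] => []
  | c :: rest =>
      PySem.Chars.replace (PySem.Chars.upperChar c :: PySem.Chars.lower rest) " The ".toList " the ".toList

def fix_capitalization (text : String) : String :=
  if text = "" then text else
  let sentences := pvSplitA text.toList [] []
  let fixedSentences := sentences.foldl (fun acc s => if s ≠ [] then acc ++ [pvFixA s] else acc) []
  String.ofList (PySem.Chars.join [' '] fixedSentences)

-- ===== PORT B =====
-- one loop step of B over the state (out, ws, started)
def pvStepB : List Char × List Char × Bool → Char → List Char × List Char × Bool
  | (out, ws, started), c =>
    if PySem.Chars.isspace c then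
      (out, if started then ws ++ [c] else ws, started)
    else
      let st :=
        if started then (out ++ ws ++ [PySem.Chars.lowerChar c], ([] : List Char), started)
        else ((if out ≠ [] then out ++ [' '] else out) ++ [PySem.Chars.upperChar c], ws, true)
      if c ∈ pvDelims then (st.1, [], false) else st

def fix_capitalization_alt (text : String) : String :=
  if text = "" then text
  else String.ofList (text.toList.foldl pvStepB ([], [], false)).1

-- ===== PRECONDITION & SPEC =====
def Spec_fix_capitalization (text : String) (out : String) : Prop := out = fix_capitalization_alt text
instance (text : String) (out : String) : Decidable (Spec_fix_capitalization text out) := by unfold Spec_fix_capitalization; infer_instance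

-- ===== CLAIM (what is proved, stated in full; the proofs are below) =====
def Claim_equal_fix_capitalization : Prop := ∀ (text : String), Dom_fix_capitalization text → Spec_fix_capitalization text (fix_capitalization text)

-- ===== LEMMAS AND PROOFS =====
lemma pv_isspace_not_upper {c : Char} (h : PySem.Chars.isspace c = true) :
    PySem.Chars.isupper c = false := by
  unfold PySem.Chars.isspace at h
  unfold PySem.Chars.isupper
  simp only [Bool.or_eq_true, Bool.and_eq_true, decide_eq_true_eq] at h
  simp only [Bool.and_eq_false_iff, decide_eq_false_iff_not, Char.le_def,
    UInt32.le_iff_toNat_le, Char.toNat_val] at *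
  have hA : ('A' : Char).toNat = 65 := by decide
  have hZ : ('Z' : Char).toNat = 90 := by decide
  rw [hA, hZ]
  omega
lemma pv_lowerChar_of_isspace {c : Char} (h : PySem.Chars.isspace c = true) :
    PySem.Chars.lowerChar c = c := by
  simp [PySem.Chars.lowerChar, pv_isspace_not_upper h]
lemma pv_lowerChar_ne_T (c : Char) : PySem.Chars.lowerChar c ≠ 'T' := by
  unfold PySem.Chars.lowerChar
  split
  · rename_i h
    unfold PySem.Chars.isupper at h
    simp only [Bool.and_eq_true, decide_eq_true_eq, Char.le_def,
      UInt32.le_iff_toNat_le, Char.toNat_val] at h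
    rw [show ('A' : Char).toNat = 65 from by decide, show ('Z' : Char).toNat = 90 from by decide] at h
    intro hc
    have h2 := congrArg Char.toNat hc
    rw [Char.toNat_ofNat] at h2
    rw [if_pos (by constructor; change c.toNat + 32 < 55296; omega)] at h2
    rw [show ('T' : Char).toNat = 84 from by decide] at h2
    omega
  · rename_i h
    intro hc
    subst hc
    simp [PySem.Chars.isupper] at h
lemma pv_replace_go_id (old new : List Char) :
    ∀ (fuel : Nat) (l acc : List Char), (∀ l', l' <:+ l → ¬ old <+: l') →
      PySem.Chars.replace.go old new fuel l acc = acc.reverse ++ l := by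
  intro fuel
  induction fuel with
  | zero => intro l acc _; simp [PySem.Chars.replace.go]
  | succ n ih =>
      intro l acc h
      cases l with
      | nil => simp [PySem.Chars.replace.go]
      | cons c t =>
          have hnp : old.isPrefixOf (c :: t) = false := by
            have := h (c :: t) (List.suffix_refl _)
            rw [Bool.eq_false_iff]
            intro hp
            exact this (List.isPrefixOf_iff_prefix.mp hp)
          rw [PySem.Chars.replace.go]
          simp only [hnp, Bool.false_eq_true, if_false]
          rw [ih t (c :: acc) (fun l' hl' => h l' (hl'.trans (List.suffix_cons c t)))]
          simp

lemma pv_replace_of_not_infix (s old new : List Char) (hne : old ≠ []) (h : ¬ old <:+: s) :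
    PySem.Chars.replace s old new = s := by
  unfold PySem.Chars.replace
  rw [if_neg (by simpa using hne)]
  rw [pv_replace_go_id old new s.length s [] (fun l' hl' hp => h (hp.isInfix.trans hl'.isInfix))]
  simp

lemma pv_pattern_not_infix (c : Char) (t : List Char) :
    ¬ (" The ".toList <:+: c :: t.map PySem.Chars.lowerChar) := by
  intro h
  obtain ⟨pre, suf, hps⟩ := h
  have hT : 'T' ∈ t.map PySem.Chars.lowerChar := by
    cases pre with
    | nil =>
        have h2 := congrArg List.tail hps
        simp at h2
        rw [← h2]
        simp
    | cons p pre' =>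
        have h2 := congrArg List.tail hps
        simp at h2
        rw [← h2]
        simp
  obtain ⟨y, _, hy⟩ := List.mem_map.mp hT
  exact pv_lowerChar_ne_T y hy
def pvCap : List Char → List Char
  | [] => []
  | c :: rest => PySem.Chars.upperChar c :: rest.map PySem.Chars.lowerChar
def pvJ (ss : List (List Char)) : List Char :=
  PySem.Chars.join [' '] ((ss.filter (fun s => decide (s ≠ []))).map pvFixA)

lemma pv_fixA_eq (c : Char) (rest : List Char) :
    pvFixA (c :: rest) = PySem.Chars.upperChar c :: rest.map PySem.Chars.lowerChar := by
  show PySem.Chars.replace _ _ _ = _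
  rw [show PySem.Chars.lower rest = rest.map PySem.Chars.lowerChar from rfl]
  exact pv_replace_of_not_infix _ _ _ (by decide) (pv_pattern_not_infix _ _)

-- strip facts
lemma pv_lstrip_ws_append (w l : List Char) (hw : ∀ c ∈ w, PySem.Chars.isspace c = true) :
    PySem.Chars.lstrip (w ++ l) = PySem.Chars.lstrip l := by
  unfold PySem.Chars.lstrip
  rw [List.dropWhile_append]
  have : List.dropWhile PySem.Chars.isspace w = [] := List.dropWhile_eq_nil_iff.mpr (fun x hx => by simp [hw x hx])
  simp [this]

lemma pv_lstrip_cons_of_not (c : Char) (t : List Char) (hc : PySem.Chars.isspace c = false) :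
    PySem.Chars.lstrip (c :: t) = c :: t := by
  unfold PySem.Chars.lstrip
  rw [List.dropWhile_cons_of_neg (by simp [hc])]

lemma pv_rstrip_ws_append (l w : List Char) (hw : ∀ c ∈ w, PySem.Chars.isspace c = true) :
    PySem.Chars.rstrip (l ++ w) = PySem.Chars.rstrip l := by
  unfold PySem.Chars.rstrip
  rw [List.reverse_append, List.dropWhile_append]
  have : List.dropWhile PySem.Chars.isspace w.reverse = [] :=
    List.dropWhile_eq_nil_iff.mpr (fun x hx => by simp [hw x (List.mem_reverse.mp hx)])
  simp [this]

lemma pv_rstrip_snoc_of_not (l : List Char) (c : Char) (hc : PySem.Chars.isspace c = false) :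
    PySem.Chars.rstrip (l ++ [c]) = l ++ [c] := by
  unfold PySem.Chars.rstrip
  rw [List.reverse_append]
  simp only [List.reverse_cons, List.reverse_nil, List.nil_append, List.singleton_append]
  rw [List.dropWhile_cons_of_neg (by simp [hc])]
  simp

lemma pv_strip_allws (w : List Char) (hw : ∀ c ∈ w, PySem.Chars.isspace c = true) :
    PySem.Chars.strip w = [] := by
  unfold PySem.Chars.strip
  rw [show w = w ++ [] from (List.append_nil w).symm, pv_lstrip_ws_append w [] hw]
  rfl
lemma pv_strip_mid (pre core ws : List Char)
    (hpre : ∀ c ∈ pre, PySem.Chars.isspace c = true)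
    (hws : ∀ c ∈ ws, PySem.Chars.isspace c = true)
    (hhead : ∃ h t, core = h :: t ∧ PySem.Chars.isspace h = false)
    (hlast : ∃ m d, core = m ++ [d] ∧ PySem.Chars.isspace d = false) :
    PySem.Chars.strip (pre ++ core ++ ws) = core := by
  obtain ⟨h, t, hct, hh⟩ := hhead
  obtain ⟨m, d, hcm, hd⟩ := hlast
  unfold PySem.Chars.strip
  rw [List.append_assoc, pv_lstrip_ws_append pre (core ++ ws) hpre]
  rw [show PySem.Chars.lstrip (core ++ ws) = core ++ ws from by
    rw [hct]; exact pv_lstrip_cons_of_not h (t ++ ws) hh]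
  rw [pv_rstrip_ws_append core ws hws, hcm]
  exact pv_rstrip_snoc_of_not m d hd

lemma pv_map_lower_ws (ws : List Char) (hws : ∀ c ∈ ws, PySem.Chars.isspace c = true) :
    ws.map PySem.Chars.lowerChar = ws :=
by
  induction ws with
  | nil => rfl
  | cons c t ih =>
      simp only [List.map_cons, pv_lowerChar_of_isspace (hws c (by simp)), List.cons.injEq, true_and]
      exact ih (fun x hx => hws x (by simp [hx]))
lemma pv_join_ne_nil (F : List (List Char)) (hF : ∀ f ∈ F, f ≠ []) (h : F ≠ []) :
    PySem.Chars.join [' '] F ≠ [] := by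
  cases F with
  | nil => simp at h
  | cons a F' =>
      cases F' with
      | nil => rw [PySem.Chars.join_singleton]; exact hF a (by simp)
      | cons b t =>
          rw [PySem.Chars.join_cons_cons]
          have := hF a (by simp)
          simp [this]

lemma pv_join_snoc (F : List (List Char)) (x : List Char) :
    PySem.Chars.join [' '] (F ++ [x]) =
      PySem.Chars.join [' '] F ++ (if F = [] then [] else [' ']) ++ x := by
  induction F with
  | nil => simp [PySem.Chars.join, List.intercalate]
  | cons a F' ih =>
      cases F' with
      | nil =>
          rw [List.cons_append, List.nil_append, PySem.Chars.join_cons_cons,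
            PySem.Chars.join_singleton, PySem.Chars.join_singleton]
          simp
      | cons b t =>
          simp only [List.cons_append] at ih ⊢
          rw [PySem.Chars.join_cons_cons, ih, PySem.Chars.join_cons_cons]
          simp

lemma pv_fixA_ne_nil (x : List Char) (hx : x ≠ []) : pvFixA x ≠ [] := by
  cases x with
  | nil => simp at hx
  | cons c t => rw [pv_fixA_eq]; simp

lemma pv_pvJ_snoc (ss : List (List Char)) (x : List Char) (hx : x ≠ []) :
    pvJ (ss ++ [x]) = pvJ ss ++ (if pvJ ss = [] then [] else [' ']) ++ pvFixA x := by
  unfold pvJ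
  rw [List.filter_append, List.filter_cons, if_pos (by simpa using hx)]
  simp only [List.filter_nil, List.map_append, List.map_cons, List.map_nil]
  rw [pv_join_snoc]
  have hiff : (List.map pvFixA (List.filter (fun s => decide (s ≠ [])) ss) = []) ↔
      (PySem.Chars.join [' '] (List.map pvFixA (List.filter (fun s => decide (s ≠ [])) ss)) = []) := by
    constructor
    · intro h; rw [h]; rfl
    · intro h
      by_contra hne
      refine pv_join_ne_nil _ ?_ hne h
      intro f hf
      obtain ⟨s, hs, rfl⟩ := List.mem_map.mp hf
      exact pv_fixA_ne_nil s (by simpa using (List.mem_filter.mp hs).2)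
  rw [if_congr hiff rfl rfl]

lemma pv_cap_snoc (h : Char) (t ws : List Char) (c : Char)
    (hws : ∀ x ∈ ws, PySem.Chars.isspace x = true) :
    pvCap ((h :: t) ++ ws ++ [c]) = pvCap (h :: t) ++ ws ++ [PySem.Chars.lowerChar c] := by
  show PySem.Chars.upperChar h :: _ = _
  rw [show pvCap (h :: t) = PySem.Chars.upperChar h :: t.map PySem.Chars.lowerChar from rfl]
  simp [pv_map_lower_ws ws hws]

lemma pv_delim_not_space (c : Char) (h : c ∈ pvDelims) : PySem.Chars.isspace c = false := by
  fin_cases h <;> decide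

lemma pv_master : ∀ (cs : List Char) (ss : List (List Char)) (pre core ws out : List Char) (started : Bool),
    (∀ c ∈ pre, PySem.Chars.isspace c = true) →
    (∀ c ∈ ws, PySem.Chars.isspace c = true) →
    (if started then
        (∃ h t, core = h :: t ∧ PySem.Chars.isspace h = false) ∧
        (∃ m d, core = m ++ [d] ∧ PySem.Chars.isspace d = false)
      else core = [] ∧ ws = []) →
    out = pvJ ss ++ (if started then (if pvJ ss = [] then [] else [' ']) ++ pvCap core else []) →
    PySem.Chars.join [' ']
        (((pvSplitA cs (pre ++ core ++ ws) ss).filter (fun s => decide (s ≠ []))).map pvFixA)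
      = (List.foldl pvStepB (out, ws, started) cs).1 := by
  intro cs
  induction cs with
  | nil =>
      intro ss pre core ws out started hpre hws hcore hout
      cases started with
      | false =>
          obtain ⟨rfl, rfl⟩ := hcore
          rw [pvSplitA]
          rw [if_neg (by
            simp only [ne_eq, not_not]
            exact pv_strip_allws _ (by simpa using hpre))]
          simpa [pvJ] using hout.symm
      | true =>
          rw [pvSplitA]
          obtain ⟨hhead, hlast⟩ := hcore
          rw [pv_strip_mid pre core ws hpre hws hhead hlast]
          obtain ⟨h, t, rfl, hh⟩ := hhead
          rw [if_pos (by simp)]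
          show pvJ (ss ++ [h :: t]) = _
          rw [pv_pvJ_snoc ss (h :: t) (by simp), pv_fixA_eq]
          simp only [List.foldl_nil, hout]
          show _ = pvJ ss ++ (if true = true then (if pvJ ss = [] then [] else [' ']) ++ pvCap (h :: t) else [])
          rw [if_pos rfl]
          show _ = pvJ ss ++ ((if pvJ ss = [] then [] else [' ']) ++ (PySem.Chars.upperChar h :: t.map PySem.Chars.lowerChar))
          simp [List.append_assoc]
  | cons c rest ih =>
      intro ss pre core ws out started hpre hws hcore hout
      rw [pvSplitA, List.foldl_cons]
      show _ = (List.foldl pvStepB (pvStepB (out, ws, started) c) rest).1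
      by_cases hsp : PySem.Chars.isspace c = true
      · -- whitespace char: A extends current, B buffers (or drops) it
        have hnd : c ∉ pvDelims := fun hm => by
          rw [pv_delim_not_space c hm] at hsp; cases hsp
        rw [if_neg hnd]
        rw [show pvStepB (out, ws, started) c
              = (out, if started then ws ++ [c] else ws, started) from by
          simp [pvStepB, hsp]]
        cases started with
        | false =>
            obtain ⟨rfl, rfl⟩ := hcore
            rw [show (pre ++ ([] : List Char) ++ ([] : List Char)) ++ [c]
                  = (pre ++ [c]) ++ ([] : List Char) ++ ([] : List Char) from by simp]
            exact ih ss (pre ++ [c]) [] [] out false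
              (by intro x hx; rcases List.mem_append.mp hx with h | h
                  · exact hpre x h
                  · simpa using (List.mem_singleton.mp h ▸ hsp))
              (by simp) (by simp) hout
        | true =>
            rw [show (pre ++ core ++ ws) ++ [c] = pre ++ core ++ (ws ++ [c]) from by simp]
            exact ih ss pre core (ws ++ [c]) out true hpre
              (by intro x hx; rcases List.mem_append.mp hx with h | h
                  · exact hws x h
                  · simpa using (List.mem_singleton.mp h ▸ hsp))
              hcore hout
      · have hsp' : PySem.Chars.isspace c = false := by
          cases hcs : PySem.Chars.isspace c
          · rfl
          · exact absurd hcs hsp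
        by_cases hd : c ∈ pvDelims
        · -- delimiter: A cuts a chunk, B flushes and resets
          rw [if_pos hd]
          cases started with
          | true =>
              obtain ⟨⟨h, t, rfl, hh⟩, hlast⟩ := hcore
              rw [show pvStepB (out, ws, true) c
                    = (out ++ ws ++ [PySem.Chars.lowerChar c], [], false) from by
                simp [pvStepB, hsp', hd]]
              rw [show ((pre ++ (h :: t) ++ ws) ++ [c])
                    = pre ++ ((h :: t) ++ ws ++ [c]) ++ ([] : List Char) from by simp]
              rw [pv_strip_mid pre ((h :: t) ++ ws ++ [c]) [] hpre (by simp)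
                ⟨h, t ++ ws ++ [c], by simp, hh⟩ ⟨(h :: t) ++ ws, c, by simp, hsp'⟩]
              rw [show pvSplitA rest [] (ss ++ [(h :: t) ++ ws ++ [c]])
                    = pvSplitA rest ([] ++ ([] : List Char) ++ ([] : List Char)) (ss ++ [(h :: t) ++ ws ++ [c]]) from by simp]
              refine ih (ss ++ [(h :: t) ++ ws ++ [c]]) [] [] [] _ false (by simp) (by simp) (by simp) ?_
              rw [pv_pvJ_snoc ss _ (by simp)]
              rw [show (h :: t) ++ ws ++ [c] = h :: (t ++ ws ++ [c]) from by simp]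
              rw [pv_fixA_eq]
              simp only [List.map_append, pv_map_lower_ws ws hws, List.map_cons, List.map_nil]
              rw [hout]
              simp [pvCap, List.append_assoc]
          | false =>
              obtain ⟨rfl, rfl⟩ := hcore
              rw [show pvStepB (out, [], false) c
                    = ((if out ≠ [] then out ++ [' '] else out) ++ [PySem.Chars.upperChar c], [], false) from by
                simp [pvStepB, hsp', hd]]
              rw [show ((pre ++ ([] : List Char) ++ ([] : List Char)) ++ [c])
                    = pre ++ [c] ++ ([] : List Char) from by simp]
              rw [pv_strip_mid pre [c] [] hpre (by simp)
                ⟨c, [], rfl, hsp'⟩ ⟨[], c, by simp, hsp'⟩]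
              rw [show pvSplitA rest [] (ss ++ [[c]])
                    = pvSplitA rest ([] ++ ([] : List Char) ++ ([] : List Char)) (ss ++ [[c]]) from by simp]
              refine ih (ss ++ [[c]]) [] [] [] _ false (by simp) (by simp) (by simp) ?_
              rw [pv_pvJ_snoc ss _ (by simp), pv_fixA_eq]
              rw [hout]
              simp only [List.map_nil]
              by_cases hj : pvJ ss = []
              · simp [hj]
              · simp [hj]
        · -- ordinary letter: A extends current, B emits it
          rw [if_neg hd]
          cases started with
          | true =>
              obtain ⟨⟨h, t, rfl, hh⟩, hlast⟩ := hcore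
              rw [show pvStepB (out, ws, true) c
                    = (out ++ ws ++ [PySem.Chars.lowerChar c], [], true) from by
                simp [pvStepB, hsp', hd]]
              rw [show ((pre ++ (h :: t) ++ ws) ++ [c])
                    = pre ++ ((h :: t) ++ ws ++ [c]) ++ ([] : List Char) from by simp]
              refine ih ss pre ((h :: t) ++ ws ++ [c]) [] _ true hpre (by simp)
                ⟨⟨h, t ++ ws ++ [c], by simp, hh⟩, ⟨(h :: t) ++ ws, c, by simp, hsp'⟩⟩ ?_
              rw [hout, pv_cap_snoc h t ws c hws]
              simp [pvCap, List.append_assoc]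
          | false =>
              obtain ⟨rfl, rfl⟩ := hcore
              rw [show pvStepB (out, [], false) c
                    = ((if out ≠ [] then out ++ [' '] else out) ++ [PySem.Chars.upperChar c], [], true) from by
                simp [pvStepB, hsp', hd]]
              rw [show ((pre ++ ([] : List Char) ++ ([] : List Char)) ++ [c])
                    = pre ++ [c] ++ ([] : List Char) from by simp]
              refine ih ss pre [c] [] _ true hpre (by simp)
                ⟨⟨c, [], rfl, hsp'⟩, ⟨[], c, by simp, hsp'⟩⟩ ?_
              rw [hout]
              by_cases hj : pvJ ss = []
              · simp [hj, pvCap]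
              · simp [hj, pvCap]

lemma pv_final (text : String) : fix_capitalization text = fix_capitalization_alt text := by
  unfold fix_capitalization fix_capitalization_alt
  by_cases h : text = ""
  · simp [h]
  · rw [if_neg h, if_neg h]
    show String.ofList _ = String.ofList _
    congr 1
    have hfold : (pvSplitA text.toList [] []).foldl
        (fun acc s => if s ≠ [] then acc ++ [pvFixA s] else acc) []
        = ((pvSplitA text.toList [] []).filter (fun s => decide (s ≠ []))).map pvFixA := by
      have := PySem.List.foldl_append_if (fun s : List Char => decide (s ≠ [])) pvFixA
        (pvSplitA text.toList [] []) []
      simpa using this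
    rw [hfold]
    have := pv_master text.toList [] [] [] [] [] false (by simp) (by simp) (by simp) (by simp [pvJ, PySem.Chars.join, List.intercalate])
    simpa using this

-- ===== VERDICT (by name: the statement is the Claim_ definition above) =====
theorem fix_capitalization_spec : Claim_equal_fix_capitalization := by
  intro text _
  unfold Spec_fix_capitalization
  exact pv_final text
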